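-- pv_equiv track=rewrite | github.com/IhorKlimov/NQueens | main.py | get_num_of_horizontal_conflicts
-- ===== SOURCE A (Python) =====
-- def get_num_of_horizontal_conflicts(arr):
--     num_of_conflicts = 0
--
--     for row in range(len(arr)):
--         for col in range(len(arr[row])):
--             if arr[row][col] == 1 and col < len(arr[row]) - 1:
--                 for c in range(col + 1, len(arr[row])):
--                     if arr[row][c] == 1:
--                         num_of_conflicts += 1
--                         break
--
--     return num_of_conflicts
-- ===== SOURCE B (Python) =====
-- def get_num_of_horizontal_conflicts(arr):
--     total = 0
--     for row in arr:
--         c = row.count(1)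
--         if c > 1:
--             total += c - 1
--     return total
-- ===== Notes on version B (the rewrite author's own statement) =====
-- stated objective: alternative
-- what changed: Replaced A's nested per-queen rightward rescan of each row by a single pass over the rows adding count(1)-1 conflicts per row when the row holds more than one queen.
import Mathlib
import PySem

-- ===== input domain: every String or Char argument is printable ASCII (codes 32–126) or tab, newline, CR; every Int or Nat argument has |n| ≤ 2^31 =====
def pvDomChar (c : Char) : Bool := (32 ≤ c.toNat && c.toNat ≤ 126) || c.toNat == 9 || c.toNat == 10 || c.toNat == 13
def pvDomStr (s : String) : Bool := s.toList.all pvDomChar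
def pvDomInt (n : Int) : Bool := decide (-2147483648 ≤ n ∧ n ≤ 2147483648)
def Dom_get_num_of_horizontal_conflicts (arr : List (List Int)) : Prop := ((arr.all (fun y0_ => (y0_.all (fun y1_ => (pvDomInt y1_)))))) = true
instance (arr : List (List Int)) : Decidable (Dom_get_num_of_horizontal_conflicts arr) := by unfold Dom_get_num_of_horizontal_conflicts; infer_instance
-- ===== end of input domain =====

-- B replaces A's nested index scan (for each queen, scan rightwards for another queen)
-- by one pass adding count(1)-1 per row with more than one queen; objective: alternative.

-- ===== PORT A =====
-- inner 'for c in range(col+1, len(row)): if row[c]==1: num += 1; break' — break modelled by a found-flag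
def pvScanRight (r : List Int) (col : Int) (acc : Int) : Int :=
  ((PySem.List.pyRange (col + 1) r.length 1).foldl
    (fun st c => if st.2 then st else if PySem.List.pyGetD r c 0 = 1 then (st.1 + 1, true) else st)
    (acc, false)).1

def get_num_of_horizontal_conflicts (arr : List (List Int)) : Int :=
  (PySem.List.pyRange 0 arr.length 1).foldl
    (fun acc row =>
      let r := PySem.List.pyGetD arr row []
      (PySem.List.pyRange 0 r.length 1).foldl
        (fun acc2 col =>
          if PySem.List.pyGetD r col 0 = 1 ∧ col < (r.length : Int) - 1 then
            pvScanRight r col acc2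
          else acc2)
        acc)
    0

-- ===== PORT B =====
def get_num_of_horizontal_conflicts_alt (arr : List (List Int)) : Int :=
  arr.foldl (fun total row =>
    let c : Int := row.count 1
    if c > 1 then total + (c - 1) else total) 0

-- ===== PRECONDITION & SPEC =====
def Spec_get_num_of_horizontal_conflicts (arr : List (List Int)) (out : Int) : Prop := out = get_num_of_horizontal_conflicts_alt arr
instance (arr : List (List Int)) (out : Int) : Decidable (Spec_get_num_of_horizontal_conflicts arr out) := by unfold Spec_get_num_of_horizontal_conflicts; infer_instance

-- ===== CLAIM (what is proved, stated in full; the proofs are below) =====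
def Claim_equal_get_num_of_horizontal_conflicts : Prop := ∀ (arr : List (List Int)), Dom_get_num_of_horizontal_conflicts arr → Spec_get_num_of_horizontal_conflicts arr (get_num_of_horizontal_conflicts arr)

-- ===== LEMMAS AND PROOFS =====

-- the break-fold adds 1 exactly when some scanned cell equals 1 (once the flag is set nothing changes)
theorem pv_break_fold (r : List Int) (l : List Int) (acc : Int) (flag : Bool) :
    ((l.foldl
      (fun st c => if st.2 then st else if PySem.List.pyGetD r c 0 = 1 then (st.1 + 1, true) else st)
      (acc, flag)).1)
    = if flag then acc else if l.any (fun c => PySem.List.pyGetD r c 0 = 1) then acc + 1 else acc := by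
  induction l generalizing acc flag with
  | nil => cases flag <;> simp
  | cons c l ih =>
    cases flag with
    | true => simp [List.foldl_cons, ih]
    | false =>
      by_cases h : PySem.List.pyGetD r c 0 = 1 <;> simp [List.foldl_cons, h, ih]

theorem pv_scan_any (r : List Int) (k : Nat) :
    (PySem.List.pyRange ((k : Int) + 1) r.length 1).any
      (fun c => PySem.List.pyGetD r c 0 = 1)
    = (r.drop (k + 1)).any (fun v => v = 1) := by
  have hmap := PySem.List.map_pyGetD_pyRange' r 0 (a := (k : Int) + 1) (by omega)
  have ht : ((k : Int) + 1).toNat = k + 1 := by omega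
  rw [ht] at hmap
  rw [← hmap, List.any_map]
  rfl

-- per-row value of A's two inner loops, in List.range form
theorem pv_row_fold (r : List Int) (acc : Int) :
    ((List.range r.length).foldl
       (fun acc2 k =>
         if r.getD k 0 = 1 ∧ (k : Int) < (r.length : Int) - 1 then
           (if (r.drop (k + 1)).any (fun v => v = 1) then acc2 + 1 else acc2)
         else acc2)
       acc)
    = acc + max 0 ((r.count 1 : Int) - 1) := by
  induction r generalizing acc with
  | nil => simp
  | cons x xs ih =>
    rw [List.length_cons, List.range_succ_eq_map, List.foldl_cons, List.foldl_map]
    show ((List.range xs.length).foldl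
        (fun acc2 k =>
          if (x :: xs).getD (k + 1) 0 = 1 ∧ ((k + 1 : Nat) : Int) < ((x :: xs).length : Int) - 1 then
            (if ((x :: xs).drop (k + 1 + 1)).any (fun v => v = 1) then acc2 + 1 else acc2)
          else acc2)
        (if (x :: xs).getD 0 0 = 1 ∧ ((0 : Nat) : Int) < ((x :: xs).length : Int) - 1 then
          (if ((x :: xs).drop (0 + 1)).any (fun v => v = 1) then acc + 1 else acc)
        else acc))
      = acc + max 0 (((x :: xs).count 1 : Int) - 1)
    have hshift :
        (fun (acc2 : Int) (k : Nat) =>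
          if (x :: xs).getD (k + 1) 0 = 1 ∧ ((k + 1 : Nat) : Int) < ((x :: xs).length : Int) - 1 then
            (if ((x :: xs).drop (k + 1 + 1)).any (fun v => v = 1) then acc2 + 1 else acc2)
          else acc2)
        = (fun (acc2 : Int) (k : Nat) =>
          if xs.getD k 0 = 1 ∧ (k : Int) < (xs.length : Int) - 1 then
            (if (xs.drop (k + 1)).any (fun v => v = 1) then acc2 + 1 else acc2)
          else acc2) := by
      funext acc2 k
      have hc : (((k + 1 : Nat) : Int) < ((x :: xs).length : Int) - 1) ↔ ((k : Int) < (xs.length : Int) - 1) := by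
        simp only [List.length_cons]; push_cast; omega
      simp only [List.getD_cons_succ, List.drop_succ_cons, hc]
      rfl
    have hhead :
        (if (x :: xs).getD 0 0 = 1 ∧ ((0 : Nat) : Int) < ((x :: xs).length : Int) - 1 then
           (if ((x :: xs).drop (0 + 1)).any (fun v => v = 1) then acc + 1 else acc)
         else acc)
        = acc + (if x = 1 ∧ xs.any (fun v => v = 1) then 1 else 0) := by
      by_cases hx : x = 1
      · by_cases ha : xs.any (fun v => v = 1) = true
        · have hne : xs ≠ [] := by rintro rfl; simp at ha
          have hl : 0 < xs.length := List.length_pos_iff.mpr hne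
          simp [hx, ha, hl]
        · simp [hx, ha]
      · simp [hx]
    rw [hshift, hhead, ih]
    have hmem : xs.any (fun v => v = 1) = true ↔ 0 < xs.count 1 := by
      rw [List.any_eq_true]
      constructor
      · rintro ⟨v, hv, he⟩; simp at he; subst he; exact List.count_pos_iff.mpr hv
      · intro h; exact ⟨1, List.count_pos_iff.mp h, by simp⟩
    have hcnt : (x :: xs).count 1 = xs.count 1 + (if x = 1 then 1 else 0) := by
      by_cases hx : x = 1 <;> simp [hx]
    by_cases hx : x = 1
    · by_cases h0 : 0 < xs.count 1
      · have ha : xs.any (fun v => v = 1) = true := hmem.mpr h0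
        rw [if_pos ⟨hx, ha⟩, hcnt, if_pos hx]
        push_cast; omega
      · have ha : ¬ (x = 1 ∧ xs.any (fun v => v = 1) = true) := fun hh => h0 (hmem.mp hh.2)
        have hz : xs.count 1 = 0 := by omega
        rw [if_neg ha, hcnt, if_pos hx, hz]
        push_cast; omega
    · have ha : ¬ (x = 1 ∧ xs.any (fun v => v = 1) = true) := fun hh => hx hh.1
      rw [if_neg ha, hcnt, if_neg hx]
      push_cast; omega

-- per-row value of A's two inner loops, as written in the port
theorem pv_row (r : List Int) (acc : Int) :
    ((PySem.List.pyRange 0 r.length 1).foldl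
      (fun acc2 col =>
        if PySem.List.pyGetD r col 0 = 1 ∧ col < (r.length : Int) - 1 then
          pvScanRight r col acc2
        else acc2)
      acc)
    = acc + max 0 ((r.count 1 : Int) - 1) := by
  rw [PySem.List.pyRange_zero_natCast, List.foldl_map]
  have hfun :
      (fun (acc2 : Int) (k : Nat) =>
        if PySem.List.pyGetD r ((k : Nat) : Int) 0 = 1 ∧ ((k : Nat) : Int) < (r.length : Int) - 1 then
          pvScanRight r ((k : Nat) : Int) acc2
        else acc2)
      = (fun (acc2 : Int) (k : Nat) =>
        if r.getD k 0 = 1 ∧ (k : Int) < (r.length : Int) - 1 then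
          (if (r.drop (k + 1)).any (fun v => v = 1) then acc2 + 1 else acc2)
        else acc2) := by
    funext acc2 k
    rw [PySem.List.pyGetD_natCast]
    by_cases h : r.getD k 0 = 1 ∧ (k : Int) < (r.length : Int) - 1
    · simp only [h, pvScanRight, pv_break_fold, pv_scan_any]
      simp
    · simp only [h, if_false]
  rw [hfun, pv_row_fold]

-- ===== VERDICT (by name: the statement is the Claim_ definition above) =====
theorem get_num_of_horizontal_conflicts_spec : Claim_equal_get_num_of_horizontal_conflicts := by
  intro arr hD
  clear hD
  unfold Spec_get_num_of_horizontal_conflicts get_num_of_horizontal_conflicts get_num_of_horizontal_conflicts_alt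
  show (PySem.List.pyRange 0 arr.length 1).foldl
      (fun acc row =>
        (PySem.List.pyRange 0 (PySem.List.pyGetD arr row []).length 1).foldl
          (fun acc2 col =>
            if PySem.List.pyGetD (PySem.List.pyGetD arr row []) col 0 = 1 ∧
                col < ((PySem.List.pyGetD arr row []).length : Int) - 1 then
              pvScanRight (PySem.List.pyGetD arr row []) col acc2
            else acc2)
          acc)
      0
    = arr.foldl (fun total row =>
        if ((row.count 1 : Int)) > 1 then total + ((row.count 1 : Int) - 1) else total) 0
  rw [PySem.List.foldl_pyRange_zero_pyGetD' arr []
    (fun acc r =>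
      (PySem.List.pyRange 0 r.length 1).foldl
        (fun acc2 col =>
          if PySem.List.pyGetD r col 0 = 1 ∧ col < (r.length : Int) - 1 then
            pvScanRight r col acc2
          else acc2) acc) 0]
  induction arr using List.reverseRecOn with
  | nil => simp
  | append_singleton xs r ih =>
    rw [List.foldl_append, List.foldl_append, ih]
    simp only [List.foldl_cons, List.foldl_nil, pv_row]
    by_cases h : ((r.count 1 : Int)) > 1
    · rw [if_pos h]; omega
    · rw [if_neg h]; omega
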